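-- pv_equiv track=rewrite | github.com/XR0D/System_analysis-21-02-s-m-e | task3/task.py | calculate_relationships
-- ===== SOURCE A (Python) =====
-- def create_tree(edges, n):
--     tree = {i: [] for i in range(1, n + 1)}
--     for parent, child in edges:
--         tree[parent].append(child)
--     return tree
--
-- def calculate_relationships(edges, n):
--     tree = create_tree(edges, n)
--     r1 = [len(tree[node]) for node in range(1, n + 1)]  # Количество потомков
--     r2 = [0] * n
--     r3 = [0] * n
--     r4 = [0] * n
--     r5 = [0] * n
--     parents = {child: parent for parent, child in edges}
--
--     for child in parents:
--         r2[child - 1] = 1  # Устанавливаем количество родителей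
--         if parents[child] in parents:
--             r4[child - 1] = 1  # Если есть дед
--
--     for node in range(1, n + 1):
--         r3[node - 1] = sum(len(tree[child]) for child in tree[node])  # Количество внуков
--         parent = parents.get(node)
--         if parent:
--             r5[node - 1] = len(tree[parent]) - 1  # Количество братьев
--
--     return r1, r2, r3, r4, r5
-- ===== SOURCE B (Python) =====
-- def calculate_relationships(edges, n):
--     childcount = {i: 0 for i in range(1, n + 1)}
--     parents = {}
--     for parent, child in edges:
--         childcount[parent] += 1
--         parents[child] = parent
--     r1 = [childcount[i] for i in range(1, n + 1)]
--     r2 = [0] * n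
--     r3 = [0] * n
--     r4 = [0] * n
--     r5 = [0] * n
--     for parent, child in edges:
--         r3[parent - 1] += childcount[child]
--     for child, parent in parents.items():
--         r2[child - 1] = 1
--         if parent in parents:
--             r4[child - 1] = 1
--         r5[child - 1] = childcount[parent] - 1
--     return r1, r2, r3, r4, r5
-- ===== Notes on version B (the rewrite author's own statement) =====
-- stated objective: alternative
-- what changed: B drops A's adjacency-list tree entirely: it builds a per-node child-count map and the child->parent map in one pass over the edges, accumulates grandchildren per edge (r3[parent-1] += childcount[child]) instead of summing over each node's child list, and fills r2/r4/r5 in a single pass over the parents map rather than A's two separate loops.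
import Mathlib
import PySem

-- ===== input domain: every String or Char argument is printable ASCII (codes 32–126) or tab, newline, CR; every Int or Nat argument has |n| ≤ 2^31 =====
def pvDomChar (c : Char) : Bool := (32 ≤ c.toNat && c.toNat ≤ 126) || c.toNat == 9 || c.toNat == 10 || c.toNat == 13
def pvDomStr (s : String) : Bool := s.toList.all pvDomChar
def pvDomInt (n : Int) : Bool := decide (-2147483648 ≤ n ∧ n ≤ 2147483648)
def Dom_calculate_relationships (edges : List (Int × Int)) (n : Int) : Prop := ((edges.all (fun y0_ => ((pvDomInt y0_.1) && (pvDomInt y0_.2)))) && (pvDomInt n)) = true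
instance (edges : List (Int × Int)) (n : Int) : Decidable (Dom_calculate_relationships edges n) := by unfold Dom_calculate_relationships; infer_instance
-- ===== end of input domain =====

-- B replaces A's adjacency-list tree by two flat maps (per-node child counts and a child→parent map)
-- and accumulates grandchildren in one pass over the edges; same cost, different decomposition ("alternative").

-- ===== PORT A =====
-- tree = {i: [] for i in range(1, n+1)}; for parent, child in edges: tree[parent].append(child)
-- (Python raises KeyError when parent ∉ 1..n; Dict.modify skips instead — such inputs are outside Pre_.)
def create_tree (edges : List (Int × Int)) (n : Int) : PySem.Dict Int (List Int) :=
  let tree := (PySem.List.pyRange 1 (n + 1)).foldl (fun d i => d.insert i ([] : List Int)) PySem.Dict.empty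
  edges.foldl (fun d p => d.modify p.1 [] (fun l => l ++ [p.2])) tree

def calculate_relationships (edges : List (Int × Int)) (n : Int) :
    List Int × List Int × List Int × List Int × List Int :=
  let tree := create_tree edges n
  -- tree[node] is looked up with getD: under Pre_ every looked-up key is present, as in the Python
  let r1 := (PySem.List.pyRange 1 (n + 1)).map (fun node => ((tree.getD node []).length : Int))
  let r2 := List.replicate n.toNat (0 : Int)
  let r3 := List.replicate n.toNat (0 : Int)
  let r4 := List.replicate n.toNat (0 : Int)
  let r5 := List.replicate n.toNat (0 : Int)
  let parents := edges.foldl (fun d p => d.insert p.2 p.1) PySem.Dict.empty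
  -- for child in parents: r2[child-1] = 1; if parents[child] in parents: r4[child-1] = 1
  let s24 := parents.keys.foldl (fun (s : List Int × List Int) child =>
      (PySem.List.pySetD s.1 (child - 1) 1,
       if parents.contains (parents.getD child 0) then PySem.List.pySetD s.2 (child - 1) 1 else s.2))
    (r2, r4)
  -- for node in range(1, n+1): r3[node-1] = sum(...); parent = parents.get(node); if parent: r5[node-1] = len(tree[parent]) - 1
  let s35 := (PySem.List.pyRange 1 (n + 1)).foldl (fun (s : List Int × List Int) node =>
      (PySem.List.pySetD s.1 (node - 1)
         (((tree.getD node []).map (fun child => ((tree.getD child []).length : Int))).sum),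
       match parents.get? node with
       | some parent => if parent ≠ 0 then
             PySem.List.pySetD s.2 (node - 1) (((tree.getD parent []).length : Int) - 1)
           else s.2
       | none => s.2))
    (r3, r5)
  (r1, s24.1, s35.1, s24.2, s35.2)

-- ===== PORT B =====
def calculate_relationships_alt (edges : List (Int × Int)) (n : Int) :
    List Int × List Int × List Int × List Int × List Int :=
  let childcount0 := (PySem.List.pyRange 1 (n + 1)).foldl (fun d i => d.insert i (0 : Int)) PySem.Dict.empty
  -- for parent, child in edges: childcount[parent] += 1; parents[child] = parent
  -- (Python raises KeyError when parent ∉ 1..n; Dict.modify skips instead — such inputs are outside Pre_.)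
  let cp := edges.foldl (fun (s : PySem.Dict Int Int × PySem.Dict Int Int) p =>
      (s.1.modify p.1 0 (fun x => x + 1), s.2.insert p.2 p.1)) (childcount0, PySem.Dict.empty)
  let childcount := cp.1
  let parents := cp.2
  let r1 := (PySem.List.pyRange 1 (n + 1)).map (fun i => childcount.getD i 0)
  let r2 := List.replicate n.toNat (0 : Int)
  let r30 := List.replicate n.toNat (0 : Int)
  let r4 := List.replicate n.toNat (0 : Int)
  let r5 := List.replicate n.toNat (0 : Int)
  -- for parent, child in edges: r3[parent-1] += childcount[child]
  let r3 := edges.foldl (fun r p =>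
      PySem.List.pySetD r (p.1 - 1) (PySem.List.pyGetD r (p.1 - 1) 0 + childcount.getD p.2 0)) r30
  -- for child, parent in parents.items(): r2[child-1] = 1; if parent in parents: r4[child-1] = 1; r5[child-1] = childcount[parent] - 1
  let s := parents.items.foldl (fun (s : List Int × List Int × List Int) p =>
      (PySem.List.pySetD s.1 (p.1 - 1) 1,
       if parents.contains p.2 then PySem.List.pySetD s.2.1 (p.1 - 1) 1 else s.2.1,
       PySem.List.pySetD s.2.2 (p.1 - 1) (childcount.getD p.2 0 - 1))) (r2, r4, r5)
  (r1, s.1, r3, s.2.1, s.2.2)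

-- ===== PRECONDITION & SPEC =====
-- Pre_ admits exactly the inputs on which the Python A returns: every edge endpoint must lie in 1..n
-- (an out-of-range parent or child makes A raise KeyError/IndexError).
def Pre_calculate_relationships (edges : List (Int × Int)) (n : Int) : Prop :=
  ∀ p ∈ edges, 1 ≤ p.1 ∧ p.1 ≤ n ∧ 1 ≤ p.2 ∧ p.2 ≤ n
instance (edges : List (Int × Int)) (n : Int) : Decidable (Pre_calculate_relationships edges n) := by
  unfold Pre_calculate_relationships; infer_instance

def pvWitness_calculate_relationships : (List (Int × Int)) × Int := ([(1, 2), (1, 3), (2, 4)], 4)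

def Spec_calculate_relationships (edges : List (Int × Int)) (n : Int) (out : List Int × List Int × List Int × List Int × List Int) : Prop := out = calculate_relationships_alt edges n
instance (edges : List (Int × Int)) (n : Int) (out : List Int × List Int × List Int × List Int × List Int) : Decidable (Spec_calculate_relationships edges n out) := by unfold Spec_calculate_relationships; infer_instance

-- ===== CLAIM (what is proved, stated in full; the proofs are below) =====
def Claim_equal_calculate_relationships : Prop := ∀ (edges : List (Int × Int)) (n : Int), Dom_calculate_relationships edges n → Pre_calculate_relationships edges n → Spec_calculate_relationships edges n (calculate_relationships edges n)

-- ===== LEMMAS AND PROOFS =====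

-- a fold over distinct-valued constant inserts keeps the default lookup
theorem getD_foldl_insert_const {ν : Type} (l : List Int) (d : PySem.Dict Int ν) (v : ν) (k : Int)
    (h : d.getD k v = v) : (l.foldl (fun d i => d.insert i v) d).getD k v = v := by
  induction l generalizing d with
  | nil => exact h
  | cons a t ih =>
      exact ih _ (by rw [PySem.Dict.getD_insert]; split <;> [rfl; exact h])

-- any value in a child→parent insert fold comes from an edge
theorem get?_foldl_insert_snd (l : List (Int × Int)) (d : PySem.Dict Int Int) (k v : Int)
    (h : (l.foldl (fun d p => d.insert p.2 p.1) d).get? k = some v) :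
    (∃ p ∈ l, p.2 = k ∧ p.1 = v) ∨ d.get? k = some v := by
  induction l generalizing d with
  | nil => exact Or.inr h
  | cons a t ih =>
      rcases ih _ h with h' | h'
      · exact Or.inl (by obtain ⟨p, hp, h2⟩ := h'; exact ⟨p, List.mem_cons_of_mem _ hp, h2⟩)
      · rw [PySem.Dict.get?_insert] at h'
        by_cases hk : k = a.2
        · simp [hk] at h'
          exact Or.inl ⟨a, List.mem_cons_self, hk.symm, h'⟩
        · simp [hk] at h'
          exact Or.inr h'

-- a fold whose body preserves length preserves length
theorem length_foldl_of_preserved {β : Type} (body : List Int → β → List Int)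
    (h : ∀ r k, (body r k).length = r.length) (l : List β) (xs : List Int) :
    (l.foldl body xs).length = xs.length := by
  induction l generalizing xs with
  | nil => rfl
  | cons a t ih => rw [List.foldl_cons, ih, h]

-- conditional write-at-(k-1) fold, read back
theorem pyGetD_foldl_set_cond (cond : Int → Bool) (f : Int → Int) (l : List Int) (xs : List Int)
    (i : Nat) (hi : i < xs.length) (hb : ∀ k ∈ l, 1 ≤ k ∧ k ≤ (xs.length : Int)) :
    PySem.List.pyGetD
        (l.foldl (fun r k => if cond k then PySem.List.pySetD r (k - 1) (f k) else r) xs) (i : Int) 0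
      = if ((i : Int) + 1) ∈ l ∧ cond ((i : Int) + 1)
          then f ((i : Int) + 1) else PySem.List.pyGetD xs (i : Int) 0 := by
  induction l generalizing xs with
  | nil => simp
  | cons k t ih =>
      obtain ⟨hk1, hk2⟩ := hb k List.mem_cons_self
      rw [List.foldl_cons]
      have hlen : (if cond k then PySem.List.pySetD xs (k - 1) (f k) else xs).length = xs.length := by
        split <;> simp [PySem.List.length_pySetD]
      have hgo : PySem.List.pyGetD (if cond k then PySem.List.pySetD xs (k - 1) (f k) else xs) (i : Int) 0
          = if k = (i : Int) + 1 ∧ cond k then f k else PySem.List.pyGetD xs (i : Int) 0 := by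
        by_cases hc : cond k
        · simp only [hc, if_true, and_true]
          have hksub : k - 1 = ((k.toNat - 1 : Nat) : Int) := by omega
          rw [hksub, PySem.List.pyGetD_pySetD_natCast _ _ _ _ _ (by omega)]
          by_cases he : k = (i : Int) + 1
          · rw [if_pos (by omega), if_pos he]
          · rw [if_neg (by omega), if_neg he]
        · simp [hc]
      rw [ih _ (by omega) (fun k' hk' => by rw [hlen]; exact hb k' (List.mem_cons_of_mem _ hk')),
          hgo]
      simp only [List.mem_cons]
      by_cases hQ : k = (i : Int) + 1 <;> by_cases hc : cond ((i : Int) + 1) <;>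
        by_cases hm : ((i : Int) + 1) ∈ t
      all_goals simp_all
      all_goals (intro h; exact absurd h.symm hQ)

-- unconditional write-at-(k-1) fold, read back
theorem pyGetD_foldl_set (f : Int → Int) (l : List Int) (xs : List Int) (i : Nat)
    (hi : i < xs.length) (hb : ∀ k ∈ l, 1 ≤ k ∧ k ≤ (xs.length : Int)) :
    PySem.List.pyGetD (l.foldl (fun r k => PySem.List.pySetD r (k - 1) (f k)) xs) (i : Int) 0
      = if ((i : Int) + 1) ∈ l then f ((i : Int) + 1) else PySem.List.pyGetD xs (i : Int) 0 := by
  simpa using pyGetD_foldl_set_cond (fun _ => true) f l xs i hi hb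

-- accumulate-at-(p.1 - 1) fold, read back
theorem pyGetD_foldl_acc (w : Int × Int → Int) (l : List (Int × Int)) (xs : List Int) (i : Nat)
    (hi : i < xs.length) (hb : ∀ p ∈ l, 1 ≤ p.1 ∧ p.1 ≤ (xs.length : Int)) :
    PySem.List.pyGetD
        (l.foldl (fun r p =>
          PySem.List.pySetD r (p.1 - 1) (PySem.List.pyGetD r (p.1 - 1) 0 + w p)) xs) (i : Int) 0
      = PySem.List.pyGetD xs (i : Int) 0
        + ((l.filter (fun p => p.1 == (i : Int) + 1)).map w).sum := by
  induction l generalizing xs with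
  | nil => simp
  | cons p t ih =>
      obtain ⟨hp1, hp2⟩ := hb p List.mem_cons_self
      rw [List.foldl_cons]
      have hksub : p.1 - 1 = ((p.1.toNat - 1 : Nat) : Int) := by omega
      have hlen : (PySem.List.pySetD xs (p.1 - 1) (PySem.List.pyGetD xs (p.1 - 1) 0 + w p)).length
          = xs.length := PySem.List.length_pySetD _ _ _
      rw [ih _ (by omega) (fun p' hp' => by rw [hlen]; exact hb p' (List.mem_cons_of_mem _ hp'))]
      rw [hksub, PySem.List.pyGetD_pySetD_natCast _ _ _ _ _ (by omega)]
      by_cases he : p.1 = (i : Int) + 1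
      · rw [if_pos (by omega)]
        have hidx : ((p.1.toNat - 1 : Nat) : Int) = (i : Int) := by omega
        rw [List.filter_cons_of_pos (by simpa using he), List.map_cons, List.sum_cons, hidx]
        ring
      · rw [if_neg (by omega), List.filter_cons_of_neg (by simpa using he)]

-- split a triple-state fold
theorem foldl_prod3_mk {β : Type} (f g h : List Int → β → List Int) (l : List β)
    (a b c : List Int) :
    l.foldl (fun s e => (f s.1 e, g s.2.1 e, h s.2.2 e)) (a, b, c)
      = (l.foldl f a, l.foldl g b, l.foldl h c) := by
  induction l generalizing a b c with
  | nil => rfl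
  | cons x t ih => exact ih _ _ _

theorem calculate_relationships_spec_aux (edges : List (Int × Int)) (n : Int)
    (hpre : Pre_calculate_relationships edges n) :
    calculate_relationships edges n = calculate_relationships_alt edges n := by
  unfold calculate_relationships calculate_relationships_alt create_tree
  dsimp only
  rw [PySem.List.foldl_prod_mk
        (fun (d : PySem.Dict Int Int) (p : Int × Int) => d.modify p.1 0 (fun x => x + 1))
        (fun (d : PySem.Dict Int Int) (p : Int × Int) => d.insert p.2 p.1),
      PySem.List.foldl_prod_mk
        (fun (r : List Int) (child : Int) => PySem.List.pySetD r (child - 1) 1)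
        (fun (r : List Int) (child : Int) =>
          if (List.foldl (fun d p => d.insert p.2 p.1) PySem.Dict.empty edges).contains
              ((List.foldl (fun d p => d.insert p.2 p.1) PySem.Dict.empty edges).getD child 0) = true
          then PySem.List.pySetD r (child - 1) 1 else r)]
  dsimp only
  set treeT := List.foldl (fun d p => d.modify p.1 [] fun l => l ++ [p.2])
      (List.foldl (fun d i => d.insert i ([] : List Int)) PySem.Dict.empty (PySem.List.pyRange 1 (n + 1))) edges
    with htreeT
  set parT := List.foldl (fun (d : PySem.Dict Int Int) (p : Int × Int) => d.insert p.2 p.1)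
      PySem.Dict.empty edges with hparT
  set ccT := List.foldl (fun (d : PySem.Dict Int Int) (p : Int × Int) => d.modify p.1 0 fun x => x + 1)
      (List.foldl (fun d i => d.insert i (0 : Int)) PySem.Dict.empty (PySem.List.pyRange 1 (n + 1))) edges
    with hccT
  -- tree[c] is exactly the children of c listed by the edges
  have hF1 : ∀ c : Int, treeT.getD c [] = (edges.filter (fun p => p.1 == c)).map (fun p => p.2) := by
    intro c
    rw [htreeT, PySem.Dict.getD_foldl_modify_append,
        getD_foldl_insert_const _ _ _ _ (PySem.Dict.getD_empty _ _), List.nil_append]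
  -- childcount[c] is the number of edges out of c
  have hF2 : ∀ c : Int, ccT.getD c 0 = ((edges.filter (fun p => p.1 == c)).length : Int) := by
    intro c
    have hsplit := List.foldl_map (f := fun p : Int × Int => p.1)
      (g := fun (d : PySem.Dict Int Int) (x : Int) => d.modify x 0 (fun v => v + 1))
      (l := edges)
      (init := List.foldl (fun d i => d.insert i (0 : Int)) PySem.Dict.empty (PySem.List.pyRange 1 (n + 1)))
    rw [hccT, ← hsplit,
        PySem.Dict.getD_foldl_modify_add_one,
        getD_foldl_insert_const _ _ _ _ (PySem.Dict.getD_empty _ _), zero_add,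
        List.count_eq_countP, List.countP_map, ← List.countP_eq_length_filter]
    rfl
  have hF3 : ∀ c : Int, ((treeT.getD c []).length : Int) = ccT.getD c 0 := by
    intro c; rw [hF1, hF2, List.length_map]
  have hnd : parT.keys.Nodup := by
    rw [hparT]
    exact PySem.Dict.nodup_keys_foldl_insert_key edges (fun p => p.2) (fun _ p => p.1)
      PySem.Dict.empty (by simp [PySem.Dict.keys_empty])
  have hval : ∀ k v : Int, parT.get? k = some v → ∃ p ∈ edges, p.2 = k ∧ p.1 = v := by
    intro k v h
    rcases get?_foldl_insert_snd edges _ k v h with h' | h'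
    · exact h'
    · simp [PySem.Dict.get?_empty] at h'
  have hkey : ∀ k ∈ parT.keys, 1 ≤ k ∧ k ≤ n := by
    intro k hk
    have hne : parT.get? k ≠ none := fun h =>
      (PySem.Dict.get?_eq_none_iff_not_mem_keys parT k).mp h hk
    obtain ⟨v, hv⟩ := Option.ne_none_iff_exists'.mp hne
    obtain ⟨p, hp, h2, _⟩ := hval k v hv
    have := hpre p hp
    omega
  have hpval : ∀ k v : Int, parT.get? k = some v → 1 ≤ v ∧ v ≤ n := by
    intro k v hv
    obtain ⟨p, hp, _, h1⟩ := hval k v hv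
    have := hpre p hp
    omega
  -- getElem / pyGetD bridge and the replicate base case
  have hbr : ∀ (xs : List Int) (i : Nat) (h : i < xs.length),
      xs[i] = PySem.List.pyGetD xs (i : Int) 0 := by
    intro xs i h
    rw [PySem.List.pyGetD_eq_getElem xs 0 (by omega) (by exact_mod_cast h)]
    simp
  have hrep : ∀ i : Nat, PySem.List.pyGetD (List.replicate n.toNat (0 : Int)) (i : Int) 0 = 0 := by
    intro i
    rw [PySem.List.pyGetD_natCast]
    simp [List.getD]
  -- rewrite B's items loop as a loop over the keys
  rw [PySem.Dict.items_eq_map_keys parT hnd 0, List.foldl_map]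
  dsimp only
  rw [foldl_prod3_mk (fun (r : List Int) (y : Int) => PySem.List.pySetD r (y - 1) 1)
        (fun (r : List Int) (y : Int) =>
          if parT.contains (parT.getD y 0) = true then PySem.List.pySetD r (y - 1) 1 else r)
        (fun (r : List Int) (y : Int) =>
          PySem.List.pySetD r (y - 1) (ccT.getD (parT.getD y 0) 0 - 1)) parT.keys,
      PySem.List.foldl_prod_mk
        (fun (r : List Int) (node : Int) => PySem.List.pySetD r (node - 1)
          ((List.map (fun child => ((treeT.getD child []).length : Int)) (treeT.getD node [])).sum))
        (fun (r : List Int) (node : Int) =>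
          match parT.get? node with
          | some parent => if parent ≠ 0 then
                PySem.List.pySetD r (node - 1) (((treeT.getD parent []).length : Int) - 1)
              else r
          | none => r) (PySem.List.pyRange 1 (n + 1))]
  dsimp only
  simp only [Prod.mk.injEq]
  refine ⟨List.map_congr_left (fun a _ => hF3 a), trivial, ?_, trivial, ?_⟩
  · -- r3
    refine List.ext_getElem ?_ ?_
    · rw [length_foldl_of_preserved _ (fun r k => PySem.List.length_pySetD _ _ _),
          length_foldl_of_preserved _ (fun r k => PySem.List.length_pySetD _ _ _)]
    · intro i h1 h2
      have hiN : i < n.toNat := by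
        rw [length_foldl_of_preserved _ (fun r k => PySem.List.length_pySetD _ _ _),
            List.length_replicate] at h1
        exact h1
      rw [hbr _ _ h1, hbr _ _ h2,
          pyGetD_foldl_set _ _ _ i (by simpa using hiN)
            (fun k hk => by rw [PySem.List.mem_pyRange_one] at hk; simp; omega),
          pyGetD_foldl_acc _ _ _ i (by simpa using hiN)
            (fun p hp => by have := hpre p hp; simp; omega),
          if_pos (by rw [PySem.List.mem_pyRange_one]; omega), hrep i, zero_add,
          hF1 ((i : Int) + 1), List.map_map]
      exact congrArg List.sum (List.map_congr_left fun p _ => hF3 p.2)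
  · -- r5
    have hbody5 : (fun (r : List Int) (node : Int) =>
        match parT.get? node with
        | some parent => if parent ≠ 0 then
              PySem.List.pySetD r (node - 1) (((treeT.getD parent []).length : Int) - 1)
            else r
        | none => r)
      = (fun (r : List Int) (node : Int) =>
          if (match parT.get? node with | some p => p != 0 | none => false) then
            PySem.List.pySetD r (node - 1)
              (((treeT.getD ((parT.get? node).getD 0) []).length : Int) - 1)
          else r) := by
      funext r node
      cases parT.get? node <;> simp
    rw [hbody5]
    refine List.ext_getElem ?_ ?_
    · rw [length_foldl_of_preserved _
            (fun r k => by split <;> (try split) <;> simp [PySem.List.length_pySetD]),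
          length_foldl_of_preserved _ (fun r k => PySem.List.length_pySetD _ _ _)]
    · intro i h1 h2
      have hiN : i < n.toNat := by
        rw [length_foldl_of_preserved _
              (fun r k => by split <;> (try split) <;> simp [PySem.List.length_pySetD]),
            List.length_replicate] at h1
        exact h1
      rw [hbr _ _ h1, hbr _ _ h2,
          pyGetD_foldl_set_cond _ _ _ _ i (by simpa using hiN)
            (fun k hk => by rw [PySem.List.mem_pyRange_one] at hk; simp; omega),
          pyGetD_foldl_set _ _ _ i (by simpa using hiN)
            (fun k hk => by have := hkey k hk; simp; omega)]
      by_cases hm : ((i : Int) + 1) ∈ parT.keys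
      · have hne : parT.get? ((i : Int) + 1) ≠ none := fun h =>
          (PySem.Dict.get?_eq_none_iff_not_mem_keys parT _).mp h hm
        obtain ⟨v, hv⟩ := Option.ne_none_iff_exists'.mp hne
        have hv1 := hpval _ v hv
        rw [if_pos ⟨by rw [PySem.List.mem_pyRange_one]; have := hkey _ hm; omega,
              by rw [hv]; simp; omega⟩,
            if_pos hm, hv, PySem.Dict.getD_eq_get?_getD parT ((i : Int) + 1) 0, hv]
        simp [hF3 v]
      · have hnone : parT.get? ((i : Int) + 1) = none := by
          rw [PySem.Dict.get?_eq_none_iff_not_mem_keys]; exact hm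
        rw [if_neg (by rw [hnone]; simp), if_neg hm]

-- ===== VERDICT (by name: the statement is the Claim_ definition above) =====
theorem calculate_relationships_spec : Claim_equal_calculate_relationships := by
  intro edges n _ hpre
  unfold Spec_calculate_relationships
  exact calculate_relationships_spec_aux edges n hpre
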